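-- pv_equiv track=rewrite | github.com/thinhhoang95/project-tailwind | src/parrhesia/api/automatic_rate_adjustment.py | _coerce_int_flow_ids
-- ===== SOURCE A (Python) =====
-- from typing import Any, Dict, Iterable, List, Mapping, Optional, Tuple, Sequence
--
-- def _coerce_int_flow_ids(flows_in: Mapping[Any, Any]) -> Dict[str, int]:
--     """Deterministically coerce flow keys to integers.
--
--     Numeric-like keys use their int value; others get assigned 0.. in sorted order.
--     Returns mapping from original stringified key to int id.
--     """
--     flow_key_to_int: Dict[str, int] = {}
--     next_id = 0
--     for k in sorted((str(x) for x in flows_in.keys()), key=str):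
--         try:
--             flow_key_to_int[k] = int(k)
--         except Exception:
--             flow_key_to_int[k] = next_id
--             next_id += 1
--     return flow_key_to_int
-- ===== SOURCE B (Python) =====
-- def _coerce_int_flow_ids(flows_in):
--     """Deterministically coerce flow keys to integers.
--
--     Two-pass shape: first collect the non-numeric stringified keys in sorted
--     order and rank them once with enumerate; then assign each key int(k) if
--     numeric, else its precomputed rank (no threaded counter).
--     """
--     keys = sorted((str(x) for x in flows_in.keys()), key=str)
--     non_numeric = []
--     for k in keys:
--         try:
--             int(k)
--         except Exception:
--             non_numeric.append(k)
--     rank = {k: i for i, k in enumerate(non_numeric)}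
--     out = {}
--     for k in keys:
--         try:
--             out[k] = int(k)
--         except Exception:
--             out[k] = rank[k]
--     return out
-- ===== Notes on version B (the rewrite author's own statement) =====
-- stated objective: alternative
-- what changed: Replaces A's single pass that threads a next_id counter through the loop with a partition-then-rank shape: collect the non-numeric keys in sorted order, rank them once with enumerate into a dict, then one pass assigning int(k) to numeric keys and the precomputed rank to the rest.
import Mathlib
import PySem

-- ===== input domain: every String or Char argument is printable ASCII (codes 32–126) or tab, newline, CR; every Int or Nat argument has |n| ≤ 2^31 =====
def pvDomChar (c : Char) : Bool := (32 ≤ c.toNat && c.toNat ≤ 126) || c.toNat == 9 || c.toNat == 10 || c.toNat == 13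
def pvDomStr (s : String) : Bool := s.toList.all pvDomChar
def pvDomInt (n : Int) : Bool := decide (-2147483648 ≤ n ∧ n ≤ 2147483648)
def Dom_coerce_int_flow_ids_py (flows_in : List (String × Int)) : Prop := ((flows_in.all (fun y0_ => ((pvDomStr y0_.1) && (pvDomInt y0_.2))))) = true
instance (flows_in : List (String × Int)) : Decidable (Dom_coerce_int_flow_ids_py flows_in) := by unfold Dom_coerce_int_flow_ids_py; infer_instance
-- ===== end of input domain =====

-- B replaces A's threaded next_id counter with a partition-then-rank shape (non-numeric keys ranked once via enumerate); objective: alternative, same cost class.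

-- ===== PORT A =====
-- the for-loop of A, threading (dict, next_id); str(x) on a string key is the key itself
def coerceLoopA : List String → PySem.Dict String Int → Int → PySem.Dict String Int
  | [], d, _ => d
  | k :: rest, d, n =>
    match PySem.Int.ofStr? k with          -- try: int(k)
    | some v => coerceLoopA rest (d.insert k v) n
    | none   => coerceLoopA rest (d.insert k n) (n + 1)   -- except: assign next_id, bump it

def coerce_int_flow_ids_py (flows_in : List (String × Int)) : List (String × Int) :=
  (coerceLoopA (PySem.List.sorted (PySem.Dict.keys (PySem.Dict.ofList flows_in)) (fun s => s) false)
    PySem.Dict.empty 0).items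

-- ===== PORT B =====
-- first pass of Source B: collect the non-numeric keys (loop with append)
def nonNumericB (ks : List String) : List String :=
  ks.foldl (fun acc k => if (PySem.Int.ofStr? k).isSome then acc else acc ++ [k]) []

-- rank = {k: i for i, k in enumerate(non_numeric)}
def rankDictB (nn : List String) : PySem.Dict String Int :=
  (PySem.List.enumerate nn 0).foldl (fun d p => d.insert p.2 p.1) PySem.Dict.empty

-- second pass of Source B: numeric keys get int(k), others rank[k]
-- (rank[k] cannot raise KeyError here — k was appended in the first pass — so the getD default 0 is never taken)
def coerceLoopB (rank : PySem.Dict String Int) : List String → PySem.Dict String Int → PySem.Dict String Int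
  | [], d => d
  | k :: rest, d =>
    match PySem.Int.ofStr? k with
    | some v => coerceLoopB rank rest (d.insert k v)
    | none   => coerceLoopB rank rest (d.insert k (rank.getD k 0))

def coerce_int_flow_ids_py_alt (flows_in : List (String × Int)) : List (String × Int) :=
  (coerceLoopB
    (rankDictB (nonNumericB (PySem.List.sorted (PySem.Dict.keys (PySem.Dict.ofList flows_in)) (fun s => s) false)))
    (PySem.List.sorted (PySem.Dict.keys (PySem.Dict.ofList flows_in)) (fun s => s) false)
    PySem.Dict.empty).items

-- ===== PRECONDITION & SPEC =====
def Spec_coerce_int_flow_ids_py (flows_in : List (String × Int)) (out : List (String × Int)) : Prop := out = coerce_int_flow_ids_py_alt flows_in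
instance (flows_in : List (String × Int)) (out : List (String × Int)) : Decidable (Spec_coerce_int_flow_ids_py flows_in out) := by unfold Spec_coerce_int_flow_ids_py; infer_instance

-- ===== CLAIM (what is proved, stated in full; the proofs are below) =====
def Claim_equal_coerce_int_flow_ids_py : Prop := ∀ (flows_in : List (String × Int)), Dom_coerce_int_flow_ids_py flows_in → Spec_coerce_int_flow_ids_py flows_in (coerce_int_flow_ids_py flows_in)

-- ===== LEMMAS AND PROOFS =====

-- cons-recursion characterisation of Source B's first (append) loop
def nonNumericRec : List String → List String
  | [] => []
  | k :: rest => if (PySem.Int.ofStr? k).isSome then nonNumericRec rest else k :: nonNumericRec rest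

lemma nonNumericB_acc (ks : List String) (acc : List String) :
    ks.foldl (fun acc k => if (PySem.Int.ofStr? k).isSome then acc else acc ++ [k]) acc
      = acc ++ nonNumericRec ks := by
  induction ks generalizing acc with
  | nil => simp [nonNumericRec]
  | cons k rest ih =>
      simp only [List.foldl_cons, nonNumericRec]
      split_ifs with h <;> simp [ih]

lemma nonNumericB_eq (ks : List String) : nonNumericB ks = nonNumericRec ks := by
  simpa using nonNumericB_acc ks []

lemma mem_nonNumericRec {k : String} {ks : List String} (h : k ∈ nonNumericRec ks) : k ∈ ks := by
  induction ks with
  | nil => simp [nonNumericRec] at h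
  | cons x rest ih =>
      simp only [nonNumericRec] at h
      split_ifs at h with hx
      · exact List.mem_cons_of_mem _ (ih h)
      · rcases List.mem_cons.mp h with rfl | h
        · exact List.mem_cons_self
        · exact List.mem_cons_of_mem _ (ih h)

-- a fold of inserts over pairs none of whose keys is k leaves get? k alone
lemma get?_foldInsert_not_mem (ps : List (Int × String)) (d : PySem.Dict String Int)
    (k : String) (h : k ∉ ps.map (·.2)) :
    (ps.foldl (fun d p => d.insert p.2 p.1) d).get? k = d.get? k := by
  induction ps generalizing d with
  | nil => rfl
  | cons p rest ih =>
      simp only [List.map_cons, List.mem_cons, not_or] at h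
      simp only [List.foldl_cons]
      rw [ih _ h.2, PySem.Dict.get?_insert_of_ne _ _ h.1]

-- the rank dict maps a non-duplicated key to its position in the list
lemma rankDictB_get? (pre suf : List String) (k : String) (hsuf : k ∉ suf) :
    (rankDictB (pre ++ k :: suf)).get? k = some (pre.length : Int) := by
  unfold rankDictB
  have hsplit : pre ++ k :: suf = (pre ++ [k]) ++ suf := by simp
  rw [hsplit, PySem.List.enumerate_append, PySem.List.enumerate_append, List.foldl_append,
      List.foldl_append]
  have h1 : PySem.List.enumerate [k] ((0 : Int) + pre.length) = [(((0 : Int) + pre.length), k)] := by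
    simp [PySem.List.enumerate]
  rw [h1]
  simp only [List.foldl_cons, List.foldl_nil]
  rw [get?_foldInsert_not_mem _ _ _ (by simpa [PySem.List.map_snd_enumerate] using hsuf),
      PySem.Dict.get?_insert_self]
  simp

-- core invariant: with next_id = |pre| and ranks taken in pre ++ nonNumericRec ks,
-- the two loops build the same dict, provided ks has no duplicates and avoids pre
lemma loop_eq (ks : List String) : ∀ (pre : List String) (d : PySem.Dict String Int),
    ks.Nodup → (∀ k ∈ ks, k ∉ pre) →
    coerceLoopA ks d (pre.length : Int)
      = coerceLoopB (rankDictB (pre ++ nonNumericRec ks)) ks d := by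
  induction ks with
  | nil => intro pre d _ _; rfl
  | cons k rest ih =>
      intro pre d hnd hpre
      have hk_pre : k ∉ pre := hpre k (by simp)
      have hrest_nd : rest.Nodup := hnd.of_cons
      have hk_rest : k ∉ rest := (List.nodup_cons.mp hnd).1
      simp only [coerceLoopA, coerceLoopB, nonNumericRec]
      cases hcase : PySem.Int.ofStr? k with
      | some v =>
          simp only [Option.isSome_some, if_true]
          exact ih pre (d.insert k v) hrest_nd (fun x hx => hpre x (by simp [hx]))
      | none =>
          simp only [Option.isSome_none, Bool.false_eq_true, if_false]
          have hk_nn : k ∉ nonNumericRec rest := fun h => hk_rest (mem_nonNumericRec h)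
          have hrank : (rankDictB (pre ++ k :: nonNumericRec rest)).getD k 0 = (pre.length : Int) := by
            rw [PySem.Dict.getD_eq_get?_getD, rankDictB_get? pre _ k hk_nn]
            rfl
          rw [hrank]
          have h2 : (pre ++ [k]) ++ nonNumericRec rest = pre ++ k :: nonNumericRec rest := by simp
          have := ih (pre ++ [k]) (d.insert k (pre.length : Int)) hrest_nd
            (fun x hx => by
              simp only [List.mem_append, List.mem_singleton]
              rintro (h | rfl)
              · exact hpre x (by simp [hx]) h
              · exact hk_rest hx)
          simp only [List.length_append, List.length_singleton, Nat.cast_add, Nat.cast_one, h2] at this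
          simpa using this

-- ===== VERDICT (by name: the statement is the Claim_ definition above) =====
theorem coerce_int_flow_ids_py_spec : Claim_equal_coerce_int_flow_ids_py := by
  intro flows_in _
  unfold Spec_coerce_int_flow_ids_py coerce_int_flow_ids_py coerce_int_flow_ids_py_alt
  have hnd : (PySem.List.sorted (PySem.Dict.keys (PySem.Dict.ofList flows_in)) (fun s => s) false).Nodup :=
    (PySem.List.sorted_perm _ _ _).nodup_iff.mpr (PySem.Dict.nodup_keys_ofList _)
  rw [nonNumericB_eq]
  have := loop_eq (PySem.List.sorted (PySem.Dict.keys (PySem.Dict.ofList flows_in)) (fun s => s) false)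
    [] PySem.Dict.empty hnd (by simp)
  simp only [List.length_nil, Nat.cast_zero, List.nil_append] at this
  rw [this]
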